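-- pv_equiv track=rewrite | github.com/claytongroth/sep-mpc-server | vectorization/vectorize_html.py | chunk_text_optimized
-- ===== SOURCE A (Python) =====
-- from typing import List, Dict, Any, Optional
--
-- CHUNK_SIZE = 1000
--
-- CHUNK_OVERLAP = 200
--
-- def chunk_text_optimized(text: str, chunk_size: int = CHUNK_SIZE, overlap: int = CHUNK_OVERLAP) -> List[str]:
--     """Optimized text chunking with better sentence boundary detection."""
--     if len(text) <= chunk_size:
--         return [text]
--
--     chunks = []
--     start = 0
--
--     while start < len(text):
--         end = min(start + chunk_size, len(text))
--
--         # Try to break at sentence boundary (more efficient)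
--         if end < len(text):
--             # Look backwards from end for sentence ending
--             search_start = max(start, end - 200)  # Don't search too far back
--
--             for i in range(end - 1, search_start - 1, -1):
--                 if text[i] in '.!?' and i + 1 < len(text) and text[i + 1].isspace():
--                     end = i + 1
--                     break
--
--         chunk = text[start:end].strip()
--         if chunk and len(chunk) > 50:  # Skip very short chunks
--             chunks.append(chunk)
--
--         # Move start position
--         start = end - overlap
--         if start >= len(text) - overlap:  # Avoid infinite loop
--             break
--
--     return chunks
-- ===== SOURCE B (Python) =====
-- from typing import List
--
-- CHUNK_SIZE = 1000
--
-- CHUNK_OVERLAP = 200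
--
--
-- def _bisect_right(a, x):
--     lo, hi = 0, len(a)
--     while lo < hi:
--         mid = (lo + hi) // 2
--         if a[mid] <= x:
--             lo = mid + 1
--         else:
--             hi = mid
--     return lo
--
--
-- def _snap(bounds, start, end):
--     """Rightmost sentence boundary in [max(start, end-200), end-1], else end."""
--     j = _bisect_right(bounds, end - 1) - 1
--     if j >= 0 and bounds[j] >= max(start, end - 200):
--         return bounds[j] + 1
--     return end
--
--
-- def chunk_text_optimized(text: str, chunk_size: int = CHUNK_SIZE, overlap: int = CHUNK_OVERLAP) -> List[str]:
--     """Chunk text via a prebuilt boundary table: spans first, then one strip/filter pass."""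
--     n = len(text)
--     if n <= chunk_size:
--         return [text]
--
--     # One scan: every position i with text[i] in '.!?' followed by whitespace.
--     bounds = [i for i in range(n - 1) if text[i] in '.!?' and text[i + 1].isspace()]
--
--     # Stage 1: compute the window spans only (no string work).
--     spans = []
--     start = 0
--     while True:
--         end = min(start + chunk_size, n)
--         if end < n:
--             end = _snap(bounds, start, end)
--         spans.append((start, end))
--         if end >= n:
--             break
--         start = end - overlap
--
--     # Stage 2: materialize, strip and filter.
--     pieces = [text[s:e].strip() for s, e in spans]
--     return [c for c in pieces if len(c) > 50]
-- ===== Notes on version B (the rewrite author's own statement) =====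
-- stated objective: alternative
-- what changed: B is staged: one scan builds a sorted table of all sentence-boundary positions, a first loop computes only (start,end) spans with the end snapped by binary search in that table, and a final map/filter pass strips and materializes the chunks, replacing A's single loop that does a backward character scan, slicing, stripping and filtering per window.
-- outside the precondition, e.g. on chunk_text_optimized('', -26, 2): A returns [], B does not finish within the time limit; on chunk_text_optimized('ab. cd', 2, 5): A raises IndexError, B does not finish within the time limit
import Mathlib
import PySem

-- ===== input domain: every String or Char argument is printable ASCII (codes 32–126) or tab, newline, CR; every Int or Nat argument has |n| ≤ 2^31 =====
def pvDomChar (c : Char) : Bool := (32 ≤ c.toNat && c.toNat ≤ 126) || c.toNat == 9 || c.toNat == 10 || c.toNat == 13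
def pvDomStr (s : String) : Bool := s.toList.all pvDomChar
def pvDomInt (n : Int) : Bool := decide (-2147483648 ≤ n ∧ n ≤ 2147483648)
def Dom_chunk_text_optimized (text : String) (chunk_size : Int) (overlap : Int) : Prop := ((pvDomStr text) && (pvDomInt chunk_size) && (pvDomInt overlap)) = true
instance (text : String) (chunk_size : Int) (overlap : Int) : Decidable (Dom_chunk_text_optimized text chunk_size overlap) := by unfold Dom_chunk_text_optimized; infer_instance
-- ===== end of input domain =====

-- B stages the work: one prebuilt sorted table of all sentence-boundary positions, a first
-- pass computing only (start, end) spans (end snapped by binary search in the table), then one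
-- strip/filter pass materializing the chunks — instead of A's single loop with a backward
-- character scan per window (objective: alternative).

-- ===== PORT A =====

-- text[i] in '.!?' and i + 1 < len(text) and text[i + 1].isspace()
def pvIsA (t : List Char) (i : Int) : Bool :=
  (match PySem.List.pyGet? t i with
   | some c => c == '.' || c == '!' || c == '?'
   | none => false)
  && decide (i + 1 < (t.length : Int))
  && (match PySem.List.pyGet? t (i + 1) with
      | some d => PySem.Chars.isspace d
      | none => false)

-- for i in range(end-1, search_start-1, -1): if pred: end = i+1; break
def pvScanA (t : List Char) : Nat → Int → Option Int
  | 0, _ => none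
  | k + 1, i => if pvIsA t i then some i else pvScanA t k (i - 1)

-- the while-loop of A; fuel only makes it total (inside Pre_ it never runs out)
def pvLoopA (t : List Char) (cs ov n : Int) : Nat → Int → List String → List String
  | 0, _, acc => acc
  | fuel + 1, start, acc =>
    if start < n then
      let end0 := min (start + cs) n
      let e :=
        if end0 < n then
          let lo := max start (end0 - 200)
          match pvScanA t (end0 - lo).toNat (end0 - 1) with
          | some i => i + 1
          | none => end0
        else end0
      let chunk := PySem.Chars.strip (PySem.List.slice t (some start) (some e))
      let acc' := if chunk ≠ [] ∧ 50 < chunk.length then acc ++ [String.ofList chunk] else acc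
      let start' := e - ov
      if start' ≥ n - ov then acc' else pvLoopA t cs ov n fuel start' acc'
    else acc

def chunk_text_optimized (text : String) (chunk_size : Int) (overlap : Int) : List String :=
  let t := text.toList
  let n : Int := t.length
  if n ≤ chunk_size then [text]
  else pvLoopA t chunk_size overlap n (t.length + 2) 0 []

-- ===== PORT B =====

-- text[i] in '.!?' and text[i+1].isspace()  (evaluated only at 0 ≤ i < n-1 in Source B)
def pvIsB (t : List Char) (i : Int) : Bool :=
  (match PySem.List.pyGet? t i with
   | some c => c == '.' || c == '!' || c == '?'
   | none => false)
  && (match PySem.List.pyGet? t (i + 1) with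
      | some d => PySem.Chars.isspace d
      | none => false)

-- bounds = [i for i in range(n - 1) if text[i] in '.!?' and text[i+1].isspace()]
def pvBounds (t : List Char) : List Int :=
  ((List.range (t.length - 1)).map (fun (m : Nat) => (m : Int))).filter (fun i => pvIsB t i)

-- _snap of Source B; _bisect_right of Source B is the prelude's PySem.List.bisectRight
def pvSnap (bounds : List Int) (start e : Int) : Int :=
  let j : Int := (PySem.List.bisectRight bounds (e - 1) : Int) - 1
  if j ≥ 0 ∧ PySem.List.pyGetD bounds j 0 ≥ max start (e - 200) then
    PySem.List.pyGetD bounds j 0 + 1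
  else e

-- stage 1 of Source B: the `while True` span-collecting loop (fuel only makes it total)
def pvSpansB (bounds : List Int) (cs ov n : Int) : Nat → Int → List (Int × Int) → List (Int × Int)
  | 0, _, spans => spans
  | fuel + 1, start, spans =>
    let e0 := min (start + cs) n
    let e := if e0 < n then pvSnap bounds start e0 else e0
    let spans' := spans ++ [(start, e)]
    if e ≥ n then spans' else pvSpansB bounds cs ov n fuel (e - ov) spans'

def chunk_text_optimized_alt (text : String) (chunk_size : Int) (overlap : Int) : List String :=
  let t := text.toList
  let n : Int := t.length
  if n ≤ chunk_size then [text]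
  else
    let spans := pvSpansB (pvBounds t) chunk_size overlap n (t.length + 2) 0 []
    let pieces := spans.map (fun p => PySem.Chars.strip (PySem.List.slice t (some p.1) (some p.2)))
    (pieces.filter (fun c => decide (50 < c.length))).map String.ofList

-- ===== PRECONDITION & SPEC =====

-- Pre_ excludes parameter combinations (chunk_size ≤ 0, or overlap > max(0, chunk_size-200),
-- with the text longer than chunk_size) on which A's start index can move backwards: there A
-- diverges or raises IndexError on some texts and returns a value on others depending on where
-- the sentence boundaries fall; the claim is stated only on the progress-safe region.
def Pre_chunk_text_optimized (text : String) (chunk_size : Int) (overlap : Int) : Prop :=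
  (text.toList.length : Int) ≤ chunk_size ∨
    (0 < chunk_size ∧ overlap ≤ max 0 (chunk_size - 200))

instance (text : String) (chunk_size : Int) (overlap : Int) : Decidable (Pre_chunk_text_optimized text chunk_size overlap) := by unfold Pre_chunk_text_optimized; infer_instance

def pvWitness_chunk_text_optimized : String × Int × Int :=
  ("The quick brown fox jumps over the lazy dog. It barked back at once and ran off quickly.", 60, 0)

def Spec_chunk_text_optimized (text : String) (chunk_size : Int) (overlap : Int) (out : List String) : Prop := out = chunk_text_optimized_alt text chunk_size overlap
instance (text : String) (chunk_size : Int) (overlap : Int) (out : List String) : Decidable (Spec_chunk_text_optimized text chunk_size overlap out) := by unfold Spec_chunk_text_optimized; infer_instance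

-- ===== CLAIM (what is proved, stated in full; the proofs are below) =====
def Claim_equal_chunk_text_optimized : Prop := ∀ (text : String) (chunk_size : Int) (overlap : Int), Dom_chunk_text_optimized text chunk_size overlap → Pre_chunk_text_optimized text chunk_size overlap → Spec_chunk_text_optimized text chunk_size overlap (chunk_text_optimized text chunk_size overlap)

-- ===== LEMMAS AND PROOFS =====

-- A's and B's boundary predicates agree (the extra bound check in A is subsumed by indexing)
theorem pvIs_agree (t : List Char) (i : Int) : pvIsA t i = pvIsB t i := by
  unfold pvIsA pvIsB
  by_cases h : i + 1 < (t.length : Int)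
  · simp [h]
  · have : PySem.List.pyGet? t (i + 1) = none := by
      rw [PySem.List.pyGet?_eq_none_iff]
      unfold PySem.Raise.InRange
      omega
    simp [h, this]

-- membership in B's boundary table
theorem mem_pvBounds (t : List Char) (i : Int) :
    i ∈ pvBounds t ↔ 0 ≤ i ∧ i < (t.length : Int) - 1 ∧ pvIsB t i = true := by
  unfold pvBounds
  simp only [List.mem_filter, List.mem_map, List.mem_range]
  constructor
  · rintro ⟨⟨m, hm, rfl⟩, hp⟩
    refine ⟨by omega, by omega, hp⟩
  · rintro ⟨h0, h1, hp⟩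
    exact ⟨⟨i.toNat, by omega, by omega⟩, hp⟩

-- B's boundary table is sorted
theorem pvBounds_sorted (t : List Char) : (pvBounds t).Pairwise (· ≤ ·) := by
  unfold pvBounds
  refine List.Pairwise.filter _ (List.Pairwise.map _ ?_ List.pairwise_lt_range)
  intro a b h
  omega

-- A's backward scan returns none when nothing in its window satisfies the predicate
theorem pvScanA_none (t : List Char) :
    ∀ (k : Nat) (i : Int), (∀ j : Int, i - k < j → j ≤ i → pvIsA t j = false) →
      pvScanA t k i = none := by
  intro k
  induction k with
  | zero => intro i _; rfl
  | succ k ih =>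
    intro i h
    unfold pvScanA
    rw [h i (by omega) (by omega)]
    simp only [Bool.false_eq_true, if_false]
    exact ih (i - 1) fun j h1 h2 => h j (by omega) (by omega)

-- A's backward scan returns the topmost hit of its window
theorem pvScanA_some (t : List Char) :
    ∀ (k : Nat) (i b : Int), i - k < b → b ≤ i → pvIsA t b = true →
      (∀ j : Int, b < j → j ≤ i → pvIsA t j = false) →
      pvScanA t k i = some b := by
  intro k
  induction k with
  | zero => intro i b h1 h2 _ _; omega
  | succ k ih =>
    intro i b h1 h2 hb htop
    unfold pvScanA
    by_cases hib : b = i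
    · subst hib; rw [hb]; simp
    · rw [htop i (by omega) le_rfl]
      simp only [Bool.false_eq_true, if_false]
      exact ih (i - 1) b (by omega) (by omega) hb
        (fun j hj1 hj2 => htop j hj1 (by omega))

-- any result of A's backward scan lies in its window
theorem pvScanA_mem (t : List Char) :
    ∀ (k : Nat) (i b : Int), pvScanA t k i = some b → i - k < b ∧ b ≤ i := by
  intro k
  induction k with
  | zero => intro i b h; simp [pvScanA] at h
  | succ k ih =>
    intro i b h
    unfold pvScanA at h
    by_cases hp : pvIsA t i = true
    · rw [hp] at h; simp at h; omega
    · rw [Bool.not_eq_true] at hp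
      rw [hp] at h; simp only [Bool.false_eq_true, if_false] at h
      have := ih (i - 1) b h; omega

-- the key step: A's backward scan over [lo, end0-1] and B's binary search in the
-- boundary table compute the same adjusted end of the current window
theorem inner_eq (t : List Char) (start end0 : Int) (hs : 0 ≤ start)
    (hlt : start < end0) (hend : end0 < (t.length : Int)) :
    (match pvScanA t (end0 - max start (end0 - 200)).toNat (end0 - 1) with
     | some i => i + 1
     | none => end0) = pvSnap (pvBounds t) start end0 := by
  unfold pvSnap
  set L := pvBounds t with hL
  set lo := max start (end0 - 200) with hlo
  set hi := end0 - 1 with hhi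
  have hlo0 : 0 ≤ lo := by omega
  have hk : ((end0 - lo).toNat : Int) = end0 - lo := by omega
  obtain ⟨hrlen, hbelow, habove⟩ :=
    PySem.List.bisectRight_spec L (end0 - 1) (pvBounds_sorted t)
  set r := PySem.List.bisectRight L (end0 - 1) with hr
  -- no boundary of the window sits at index ≥ r of L
  have hnot_hi : ∀ j : Int, lo ≤ j → j ≤ hi → pvIsA t j = true → ∃ m : Nat, ∃ hm : m < L.length, L[m] = j ∧ m < r := by
    intro j h1 h2 hj
    have hjB : pvIsB t j = true := by rw [← pvIs_agree t j]; exact hj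
    have hjm : j ∈ L := (mem_pvBounds t j).2 ⟨by omega, by omega, hjB⟩
    obtain ⟨m, hm, hLm⟩ := List.mem_iff_getElem.1 hjm
    refine ⟨m, hm, hLm, ?_⟩
    by_contra hge
    have := habove m hm (by omega)
    omega
  by_cases hr0 : r = 0
  · -- no boundary ≤ end0-1 at all: both sides keep end0
    have hnone : pvScanA t (end0 - lo).toNat (end0 - 1) = none := by
      apply pvScanA_none
      intro j h1 h2
      rw [hk] at h1
      by_contra hc
      rw [Bool.not_eq_false] at hc
      obtain ⟨m, hm, _, hmr⟩ := hnot_hi j (by omega) h2 hc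
      omega
    rw [hnone]
    simp only [hr0]
    norm_num
  · have hr1 : r - 1 < L.length := by omega
    have hb : PySem.List.pyGetD L ((r : Int) - 1) 0 = L[r - 1] := by
      have h1 : (r : Int) - 1 = ((r - 1 : Nat) : Int) := by omega
      rw [h1, PySem.List.pyGetD_natCast, List.getD_eq_getElem _ _ hr1]
    set b := L[r - 1]'hr1 with hbdef
    have hble : b ≤ hi := hbelow (r - 1) hr1 (by omega)
    have hpw := List.pairwise_iff_getElem.1 (pvBounds_sorted t)
    have hmono : ∀ (m : Nat) (hm : m < L.length), m < r → L[m] ≤ b := by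
      intro m hm hmr
      rcases Nat.lt_or_ge m (r - 1) with h | h
      · exact hpw m (r - 1) hm hr1 h
      · have hmeq : m = r - 1 := by omega
        subst hmeq; exact le_refl _
    have hbmem : b ∈ L := List.getElem_mem hr1
    obtain ⟨hb0, hbn, hbB⟩ := (mem_pvBounds t b).1 hbmem
    have hbA : pvIsA t b = true := by rw [pvIs_agree t b]; exact hbB
    by_cases hblo : b ≥ lo
    · -- rightmost boundary lies in the window: both sides move end to b+1
      have hsome : pvScanA t (end0 - lo).toNat (end0 - 1) = some b := by
        apply pvScanA_some t _ _ b (by omega) (by omega) hbA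
        intro j hj1 hj2
        by_contra hc
        rw [Bool.not_eq_false] at hc
        obtain ⟨m, hm, hLm, hmr⟩ := hnot_hi j (by omega) hj2 hc
        have := hmono m hm hmr
        omega
      rw [hsome]
      simp only []
      rw [if_pos ⟨by omega, by rw [hb]; exact hblo⟩, hb]
    · -- rightmost boundary is below the window: both sides keep end0
      have hnone : pvScanA t (end0 - lo).toNat (end0 - 1) = none := by
        apply pvScanA_none
        intro j h1 h2
        rw [hk] at h1
        by_contra hc
        rw [Bool.not_eq_false] at hc
        obtain ⟨m, hm, hLm, hmr⟩ := hnot_hi j (by omega) h2 hc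
        have := hmono m hm hmr
        omega
      rw [hnone]
      simp only []
      rw [if_neg]
      rintro ⟨hj0, hjge⟩
      rw [hb] at hjge
      omega

-- lower bound on the adjusted end of the window (for the progress invariant)
theorem e_lower (t : List Char) (start end0 lo e : Int)
    (hlt : start < end0) (hlo1 : start ≤ lo) (hlo2 : end0 - 200 ≤ lo)
    (he : e = match pvScanA t (end0 - lo).toNat (end0 - 1) with
              | some i => i + 1
              | none => end0) :
    start + 1 ≤ e ∧ end0 - 199 ≤ e := by
  cases hscan : pvScanA t (end0 - lo).toNat (end0 - 1) with
  | none => rw [hscan] at he; simp only [] at he; omega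
  | some i =>
    rw [hscan] at he
    simp only [] at he
    obtain ⟨h1, h2⟩ := pvScanA_mem t _ _ _ hscan
    by_cases hcase : end0 ≤ lo
    · rw [Int.toNat_eq_zero.mpr (by linarith : end0 - lo ≤ 0)] at h1
      simp at h1
      constructor <;> linarith
    · rw [Int.toNat_of_nonneg (by linarith : (0:Int) ≤ end0 - lo)] at h1
      constructor <;> linarith

-- B's chunk pipeline (stage 2 of Source B), named for the proofs
def pvPipe (t : List Char) (sp : List (Int × Int)) : List String :=
  (((sp.map (fun p => PySem.Chars.strip (PySem.List.slice t (some p.1) (some p.2)))).filter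
      (fun c => decide (50 < c.length))).map String.ofList)

-- appending one span to stage 1 appends (at most) one chunk to stage 2
theorem pvPipe_append_single (t : List Char) (sp : List (Int × Int)) (p : Int × Int) :
    pvPipe t (sp ++ [p]) =
      pvPipe t sp ++
        (if 50 < (PySem.Chars.strip (PySem.List.slice t (some p.1) (some p.2))).length
         then [String.ofList (PySem.Chars.strip (PySem.List.slice t (some p.1) (some p.2)))]
         else []) := by
  by_cases h : 50 < (PySem.Chars.strip (PySem.List.slice t (some p.1) (some p.2))).length
  · simp [pvPipe, h]
  · simp [pvPipe, h]

-- an out-of-range span materializes to nothing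
theorem strip_slice_empty (t : List Char) (start : Int) (hs : (t.length : Int) ≤ start) :
    PySem.Chars.strip (PySem.List.slice t (some start) (some (t.length : Int))) = [] := by
  have h1 : PySem.List.slice t (some start) (some (t.length : Int)) = [] := by
    rw [PySem.List.slice_toNat t (by omega) (by omega)]
    rw [List.drop_eq_nil_of_le (by omega)]
    simp
  rw [h1]
  rfl

-- the loops agree step for step: A's loop over an already-piped accumulator equals
-- B's pipeline over B's span loop
theorem loopA_eq_pipe (t : List Char) (cs ov : Int)
    (hcs : 0 < cs) (hov : ov ≤ max 0 (cs - 200)) :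
    ∀ (fuel : Nat) (start : Int) (sp : List (Int × Int)), 0 ≤ start →
      pvLoopA t cs ov (t.length : Int) fuel start (pvPipe t sp) =
      pvPipe t (pvSpansB (pvBounds t) cs ov (t.length : Int) fuel start sp) := by
  have hov' : ov ≤ 0 ∨ ov ≤ cs - 200 := le_max_iff.mp hov
  intro fuel
  induction fuel with
  | zero => intro start sp _; rfl
  | succ fuel ih =>
    intro start sp hs0
    set n : Int := (t.length : Int) with hn
    unfold pvLoopA pvSpansB
    simp only []
    by_cases hstart : start < n
    · rw [if_pos hstart]
      set end0 := min (start + cs) n with hend0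
      have hslt : start < end0 := by omega
      by_cases hlt : end0 < n
      · rw [if_pos hlt, if_pos hlt]
        have hinner := inner_eq t start end0 hs0 hslt hlt
        rw [hinner]
        set e := pvSnap (pvBounds t) start end0 with he
        have heb : start + 1 ≤ e ∧ end0 - 199 ≤ e := by
          refine e_lower t start end0 (max start (end0 - 200)) e hslt (le_max_left _ _) (by omega) ?_
          rw [hinner]
        have hend0e : end0 = start + cs := by omega
        set chunk := PySem.Chars.strip (PySem.List.slice t (some start) (some e)) with hc
        have hacc : (if chunk ≠ [] ∧ 50 < chunk.length
                     then pvPipe t sp ++ [String.ofList chunk] else pvPipe t sp) =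
            pvPipe t (sp ++ [(start, e)]) := by
          rw [pvPipe_append_single]
          simp only [← hc]
          by_cases hk : 50 < chunk.length
          · rw [if_pos ⟨by intro hnil; rw [hnil] at hk; simp at hk, hk⟩, if_pos hk]
          · rw [if_neg (fun h => hk h.2), if_neg hk]
            simp
        rw [hacc]
        by_cases hbr : e ≥ n
        · rw [if_pos (show e - ov ≥ n - ov by omega), if_pos hbr]
        · rw [if_neg (show ¬ e - ov ≥ n - ov by omega), if_neg hbr]
          exact ih (e - ov) (sp ++ [(start, e)]) (by omega)
      · rw [if_neg hlt, if_neg hlt]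
        have hend0n : end0 = n := by omega
        set chunk := PySem.Chars.strip (PySem.List.slice t (some start) (some end0)) with hc
        have hacc : (if chunk ≠ [] ∧ 50 < chunk.length
                     then pvPipe t sp ++ [String.ofList chunk] else pvPipe t sp) =
            pvPipe t (sp ++ [(start, end0)]) := by
          rw [pvPipe_append_single]
          simp only [← hc]
          by_cases hk : 50 < chunk.length
          · rw [if_pos ⟨by intro hnil; rw [hnil] at hk; simp at hk, hk⟩, if_pos hk]
          · rw [if_neg (fun h => hk h.2), if_neg hk]
            simp
        rw [hacc, if_pos (show end0 - ov ≥ n - ov by omega), if_pos (show end0 ≥ n by omega)]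
    · rw [if_neg hstart]
      have h1 : min (start + cs) n = n := min_eq_right (by omega)
      rw [h1, if_neg (lt_irrefl n), if_pos (le_refl n), pvPipe_append_single]
      rw [strip_slice_empty t start (by omega)]
      simp

-- ===== VERDICT (by name: the statement is the Claim_ definition above) =====
theorem chunk_text_optimized_spec : Claim_equal_chunk_text_optimized := by
  intro text cs ov _ hpre
  unfold Spec_chunk_text_optimized chunk_text_optimized chunk_text_optimized_alt
  simp only []
  by_cases hsmall : ((text.toList.length : Int)) ≤ cs
  · rw [if_pos hsmall, if_pos hsmall]
  · rw [if_neg hsmall, if_neg hsmall]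
    rcases hpre with h | ⟨h1, h2⟩
    · exact absurd h hsmall
    · have h := loopA_eq_pipe text.toList cs ov h1 h2 (text.toList.length + 2) 0 [] le_rfl
      simpa [pvPipe] using h
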